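-- pv_equiv track=rewrite | github.com/ethicbrudhack/Bitcoin-ECDSA-ML-Assisted-Recovery-Nonce-Correlation-Analyzer | liniowozalezneAI2.1.py | common_prefix_length
-- ===== SOURCE A (Python) =====
-- def common_prefix_length(hash1, hash2):
--     bin1 = bin(int(hash1, 16))[2:].zfill(160)
--     bin2 = bin(int(hash2, 16))[2:].zfill(160)
--     count = 0
--     for b1, b2 in zip(bin1, bin2):
--         if b1 == b2:
--             count += 1
--         else:
--             break
--     return count
-- ===== SOURCE B (Python) =====
-- def common_prefix_length(hash1, hash2):
--     d = int(hash1, 16) ^ int(hash2, 16)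
--     return 160 if d == 0 else 160 - d.bit_length()
-- ===== Notes on version B (the rewrite author's own statement) =====
-- stated objective: simpler
-- what changed: B replaces A's construction of two zero-padded 160-character bit strings and a character-by-character scan with a single XOR of the parsed integers and a bit_length; Pre_ restricts to the function's natural domain (valid hex strings denoting nonnegative values fitting in 160 bits), outside which A's value is an accident of bin()-slicing and zip truncation.
-- outside the precondition, e.g. on common_prefix_length('-1', '-2'): A returns 157, B returns 159
import Mathlib
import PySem

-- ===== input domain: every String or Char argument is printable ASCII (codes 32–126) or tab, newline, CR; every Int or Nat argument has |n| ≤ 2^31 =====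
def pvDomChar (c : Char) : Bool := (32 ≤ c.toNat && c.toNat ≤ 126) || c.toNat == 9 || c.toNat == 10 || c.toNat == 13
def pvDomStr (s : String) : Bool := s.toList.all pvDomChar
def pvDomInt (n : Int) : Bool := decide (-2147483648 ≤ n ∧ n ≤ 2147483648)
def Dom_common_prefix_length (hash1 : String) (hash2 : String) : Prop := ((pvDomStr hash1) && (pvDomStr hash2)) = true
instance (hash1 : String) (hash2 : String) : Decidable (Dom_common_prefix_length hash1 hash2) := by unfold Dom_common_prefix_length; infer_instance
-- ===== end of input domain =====

-- B replaces A's two zero-padded 160-character bit strings and character scan by one XOR of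
-- the parsed integers plus a bit_length (simpler, on the natural 160-bit-hash domain).

-- ===== PORT A =====
-- the 'for b1, b2 in zip(bin1, bin2): … break' loop, with its running count
def cplLoop : List (Char × Char) → Int → Int
  | [], count => count
  | (b1, b2) :: rest, count => if b1 = b2 then cplLoop rest (count + 1) else count

def common_prefix_length (hash1 : String) (hash2 : String) : Int :=
  match PySem.Int.ofStrBase? hash1 16, PySem.Int.ofStrBase? hash2 16 with
  | some n1, some n2 =>
    -- bin(int(hash, 16))[2:].zfill(160)
    let bin1 := PySem.Chars.zfill (PySem.List.slice (PySem.Int.toBinChars0b n1) (some 2) none) 160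
    let bin2 := PySem.Chars.zfill (PySem.List.slice (PySem.Int.toBinChars0b n2) (some 2) none) 160
    cplLoop (bin1.zip bin2) 0
  | _, _ => 0   -- int() raised ValueError: excluded by Pre_common_prefix_length

-- ===== PORT B =====
def common_prefix_length_alt (hash1 : String) (hash2 : String) : Int :=
  match PySem.Int.ofStrBase? hash1 16 with
  | none => 0      -- int() raised ValueError: excluded by Pre_common_prefix_length
  | some n1 =>
    match PySem.Int.ofStrBase? hash2 16 with
    | none => 0
    | some n2 =>
      let d := PySem.Int.bxor n1 n2
      if d = 0 then 160 else 160 - (PySem.Int.bitLength d : Int)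

-- ===== PRECONDITION & SPEC =====
-- Pre_ restricts to the function's natural domain: both strings parse under int(·,16) (A raises
-- ValueError otherwise) and denote NONNEGATIVE values fitting in 160 bits — outside it (negative
-- or oversize values are not 160-bit hashes) A's value is an accident of the bin() slice and of
-- zip truncating two bit strings of different lengths.
def Pre_common_prefix_length (hash1 : String) (hash2 : String) : Prop :=
  (0 ≤ (PySem.Int.ofStrBase? hash1 16).getD (-1) ∧ (PySem.Int.ofStrBase? hash1 16).getD (-1) < 2 ^ 160) ∧
  (0 ≤ (PySem.Int.ofStrBase? hash2 16).getD (-1) ∧ (PySem.Int.ofStrBase? hash2 16).getD (-1) < 2 ^ 160)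
instance (hash1 : String) (hash2 : String) : Decidable (Pre_common_prefix_length hash1 hash2) := by
  unfold Pre_common_prefix_length; infer_instance

def pvWitness_common_prefix_length : String × String := ("ab", "0xF3")

def Spec_common_prefix_length (hash1 : String) (hash2 : String) (out : Int) : Prop := out = common_prefix_length_alt hash1 hash2
instance (hash1 : String) (hash2 : String) (out : Int) : Decidable (Spec_common_prefix_length hash1 hash2 out) := by unfold Spec_common_prefix_length; infer_instance

-- ===== CLAIM (what is proved, stated in full; the proofs are below) =====
def Claim_equal_common_prefix_length : Prop := ∀ (hash1 : String) (hash2 : String), Dom_common_prefix_length hash1 hash2 → Pre_common_prefix_length hash1 hash2 → Spec_common_prefix_length hash1 hash2 (common_prefix_length hash1 hash2)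

-- ===== LEMMAS AND PROOFS =====

-- `Nat.toDigits 2` as the natural MSB-first recursion
def rep (n : Nat) : List Char :=
  if _h : n < 2 then [Nat.digitChar n]
  else rep (n / 2) ++ [Nat.digitChar (n % 2)]
decreasing_by exact Nat.div_lt_self (by omega) (by omega)

-- fixed-width (w-bit) MSB-first representation
def binRep : Nat → Nat → List Char
  | 0, _ => []
  | w + 1, a => Nat.digitChar (a / 2 ^ w) :: binRep w (a % 2 ^ w)

-- Python's bit_length on a Nat
def blN (a : Nat) : Nat := PySem.Int.bitLength (a : Int)

theorem toDigitsCore_two (f : Nat) : ∀ n acc, n < 2 ^ f →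
    Nat.toDigitsCore 2 (f + 1) n acc = rep n ++ acc := by
  induction f with
  | zero =>
    intro n acc h
    have hn : n = 0 := by omega
    subst hn
    rw [rep.eq_def]
    simp [Nat.toDigitsCore]
  | succ f ih =>
    intro n acc h
    rw [Nat.toDigitsCore]
    by_cases h2 : n / 2 = 0
    · have hn : n < 2 := by omega
      rw [rep.eq_def]
      simp [h2, hn, Nat.mod_eq_of_lt hn]
    · have hlt : n / 2 < 2 ^ f := by
        rw [Nat.div_lt_iff_lt_mul (by norm_num)]
        calc n < 2 ^ (f + 1) := h
        _ = 2 ^ f * 2 := by ring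
      simp only [h2, if_neg]
      rw [ih (n / 2) _ hlt]
      conv_rhs => rw [rep.eq_def]
      have hn : ¬ n < 2 := by omega
      simp [hn]

theorem toDigits_two (n : Nat) : Nat.toDigits 2 n = rep n := by
  show Nat.toDigitsCore 2 (n + 1) n [] = rep n
  rw [toDigitsCore_two n n [] (Nat.lt_two_pow_self), List.append_nil]

theorem rep_ne_nil (n : Nat) : rep n ≠ [] := by
  rw [rep.eq_def]
  split <;> simp

theorem rep_mem (n : Nat) : ∀ c ∈ rep n, c = '0' ∨ c = '1' := by
  induction n using Nat.strong_induction_on with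
  | _ n ih =>
    rw [rep.eq_def]
    split
    · rename_i _h
      intro c hc
      simp at hc
      subst hc
      interval_cases n <;> decide
    · rename_i h
      intro c hc
      rcases List.mem_append.mp hc with h1 | h1
      · exact ih (n / 2) (Nat.div_lt_self (by omega) (by omega)) c h1
      · simp at h1
        subst h1
        rcases Nat.mod_two_eq_zero_or_one n with hm | hm <;> rw [hm] <;> decide

theorem lt_two_pow_blN (a : Nat) : a < 2 ^ blN a := by
  have := PySem.Int.lt_two_pow_bitLength (a : Int)
  simpa [blN] using this

theorem blN_le_of_lt_two_pow {a k : Nat} (h : a < 2 ^ k) : blN a ≤ k := by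
  by_cases ha : a = 0
  · simp [ha, blN, PySem.Int.bitLength_zero]
  · by_contra hlt
    have h2 : 2 ^ (blN a - 1) ≤ a := by
      have := PySem.Int.two_pow_bitLength_le (a : Int) (by exact_mod_cast ha)
      simpa [blN] using this
    have : 2 ^ k ≤ 2 ^ (blN a - 1) := Nat.pow_le_pow_right (by omega) (by omega)
    omega

theorem lt_blN_of_two_pow_le {a k : Nat} (h : 2 ^ k ≤ a) : k < blN a := by
  have h1 : a < 2 ^ blN a := lt_two_pow_blN a
  have : 2 ^ k < 2 ^ blN a := by omega
  exact (Nat.pow_lt_pow_iff_right (by omega)).mp this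

theorem blN_eq_of_bounds {a k : Nat} (h1 : 2 ^ k ≤ a) (h2 : a < 2 ^ (k + 1)) : blN a = k + 1 := by
  have := lt_blN_of_two_pow_le h1
  have := blN_le_of_lt_two_pow h2
  omega

theorem blN_pos (a : Nat) (h : 0 < a) : 0 < blN a := by
  have := lt_blN_of_two_pow_le (k := 0) (by simpa using h)
  omega

theorem length_rep (n : Nat) : (rep n).length = max 1 (blN n) := by
  induction n using Nat.strong_induction_on with
  | _ n ih =>
    rw [rep.eq_def]
    split
    · rename_i h
      interval_cases n
      · simp [blN, PySem.Int.bitLength_zero]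
      · have : blN 1 = 1 := blN_eq_of_bounds (k := 0) (by omega) (by omega)
        simp [this]
    · rename_i h
      have hrec : blN n = blN (n / 2) + 1 := by
        have := PySem.Int.bitLength_natCast (m := n) (by omega)
        simpa [blN] using this
      have hp : 0 < blN (n / 2) := blN_pos _ (by omega)
      simp [ih (n / 2) (Nat.div_lt_self (by omega) (by omega)), hrec]
      omega

theorem binRep_snoc (w : Nat) : ∀ b, b < 2 ^ (w + 1) →
    binRep (w + 1) b = binRep w (b / 2) ++ [Nat.digitChar (b % 2)] := by
  induction w with
  | zero =>
    intro b hb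
    have : b < 2 := by simpa using hb
    simp [binRep, Nat.mod_eq_of_lt this, Nat.div_eq_of_lt this]
  | succ w ih =>
    intro b hb
    have h1 : binRep (w + 1 + 1) b = Nat.digitChar (b / 2 ^ (w + 1)) :: binRep (w + 1) (b % 2 ^ (w + 1)) := rfl
    rw [h1, ih (b % 2 ^ (w + 1)) (Nat.mod_lt _ (by positivity))]
    have h2 : binRep (w + 1) (b / 2) = Nat.digitChar (b / 2 / 2 ^ w) :: binRep w ((b / 2) % 2 ^ w) := rfl
    rw [h2]
    have e1 : b / 2 / 2 ^ w = b / 2 ^ (w + 1) := by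
      rw [Nat.div_div_eq_div_mul]
      congr 1
      ring
    have e2 : (b % 2 ^ (w + 1)) / 2 = (b / 2) % 2 ^ w := by
      have : (2 : Nat) ^ (w + 1) = 2 * 2 ^ w := by ring
      rw [this, Nat.mod_mul_right_div_self]
    have e3 : b % 2 ^ (w + 1) % 2 = b % 2 := Nat.mod_mod_of_dvd b (dvd_pow_self 2 (by omega))
    rw [e1, e2, e3]
    simp

theorem rep_msb (w : Nat) : ∀ a, 2 ^ w ≤ a → a < 2 ^ (w + 1) →
    rep a = '1' :: binRep w (a % 2 ^ w) := by
  induction w with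
  | zero =>
    intro a h1 h2
    have : a = 1 := by simp at h1 h2; omega
    subst this
    rw [rep.eq_def]
    norm_num [binRep]
    decide
  | succ w ih =>
    intro a h1 h2
    rw [rep.eq_def]
    have hge : ¬ a < 2 := by
      have : (2:Nat) ≤ 2 ^ (w + 1) := by
        calc (2:Nat) = 2 ^ 1 := by norm_num
        _ ≤ 2 ^ (w + 1) := Nat.pow_le_pow_right (by omega) (by omega)
      omega
    simp only [hge, dite_false]
    have ha2l : 2 ^ w ≤ a / 2 := by
      rw [Nat.le_div_iff_mul_le (by omega)]
      calc 2 ^ w * 2 = 2 ^ (w + 1) := by ring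
      _ ≤ a := h1
    have ha2r : a / 2 < 2 ^ (w + 1) := by
      rw [Nat.div_lt_iff_lt_mul (by omega)]
      calc a < 2 ^ (w + 1 + 1) := h2
      _ = 2 ^ (w + 1) * 2 := by ring
    rw [ih (a / 2) ha2l ha2r]
    rw [binRep_snoc w (a % 2 ^ (w + 1)) (Nat.mod_lt _ (by positivity))]
    have e2 : (a % 2 ^ (w + 1)) / 2 = (a / 2) % 2 ^ w := by
      have : (2 : Nat) ^ (w + 1) = 2 * 2 ^ w := by ring
      rw [this, Nat.mod_mul_right_div_self]
    have e3 : a % 2 ^ (w + 1) % 2 = a % 2 := Nat.mod_mod_of_dvd a (dvd_pow_self 2 (by omega))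
    rw [e2, e3]
    simp

theorem padded_eq_binRep (w : Nat) : ∀ a, 1 ≤ w → a < 2 ^ w →
    List.replicate (w - (rep a).length) '0' ++ rep a = binRep w a := by
  induction w with
  | zero => intro a h; omega
  | succ w ih =>
    intro a _ ha
    by_cases hw : w = 0
    · subst hw
      have : a < 2 := by simpa using ha
      rw [rep.eq_def]
      simp [this, binRep, Nat.div_eq_of_lt this]
    · by_cases hsmall : a < 2 ^ w
      · have hlen : (rep a).length ≤ w := by
          rw [length_rep]
          have := blN_le_of_lt_two_pow hsmall
          omega
        have h0 : a / 2 ^ w = 0 := Nat.div_eq_of_lt hsmall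
        have : binRep (w + 1) a = Nat.digitChar (a / 2 ^ w) :: binRep w (a % 2 ^ w) := rfl
        rw [this, h0, Nat.mod_eq_of_lt hsmall, ← ih a (by omega) hsmall]
        have : w + 1 - (rep a).length = (w - (rep a).length) + 1 := by omega
        rw [this, List.replicate_succ]
        rfl
      · push_neg at hsmall
        have hbl : blN a = w + 1 := blN_eq_of_bounds hsmall ha
        have hlen : (rep a).length = w + 1 := by rw [length_rep, hbl]; omega
        rw [hlen]
        simp only [Nat.sub_self, List.replicate_zero, List.nil_append]
        have : binRep (w + 1) a = Nat.digitChar (a / 2 ^ w) :: binRep w (a % 2 ^ w) := rfl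
        rw [this]
        have h1 : a / 2 ^ w = 1 := Nat.div_eq_of_lt_le (by simpa using hsmall) (by
          calc a < 2 ^ (w + 1) := ha
          _ = (1 + 1) * 2 ^ w := by ring)
        rw [h1, rep_msb w a hsmall ha]
        rfl

theorem zfill_rep (a : Nat) :
    PySem.Chars.zfill (rep a) 160 =
      List.replicate (max 160 (blN a) - (rep a).length) '0' ++ rep a := by
  rw [PySem.Chars.zfill.eq_def]
  by_cases h : (160 : Int) ≤ (rep a).length
  · rw [if_pos h]
    have hlen : 160 ≤ (rep a).length := by exact_mod_cast h
    have : max 160 (blN a) = (rep a).length := by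
      rw [length_rep] at hlen ⊢
      omega
    rw [this]
    simp
  · rw [if_neg h]
    have hlen : (rep a).length < 160 := by omega
    have hmax : max 160 (blN a) = 160 := by
      rw [length_rep] at hlen
      omega
    rcases hn : rep a with _ | ⟨c, rest⟩
    · exact absurd hn (rep_ne_nil a)
    · have hc : c = '0' ∨ c = '1' := by
        apply rep_mem a
        rw [hn]; exact List.mem_cons_self
      have hns : ¬ (c = '+' ∨ c = '-') := by
        rcases hc with h | h <;> subst h <;> decide
      simp only [hns, if_neg, hmax]
      norm_num
      congr 1

theorem cplLoop_acc (l : List (Char × Char)) : ∀ c : Int, cplLoop l c = c + cplLoop l 0 := by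
  induction l with
  | nil => intro c; simp [cplLoop]
  | cons p rest ih =>
    intro c
    obtain ⟨b1, b2⟩ := p
    by_cases h : b1 = b2
    · simp only [cplLoop, h, if_pos]
      rw [ih (c + 1), ih (0 + 1)]
      ring
    · simp [cplLoop, h]

theorem xor_high_eq {w a b : Nat} (ha : a < 2 ^ (w + 1)) (hb : b < 2 ^ (w + 1))
    (hq : a / 2 ^ w = b / 2 ^ w) : a ^^^ b = (a % 2 ^ w) ^^^ (b % 2 ^ w) := by
  apply Nat.eq_of_testBit_eq
  intro i
  simp only [Nat.testBit_xor, Nat.testBit_mod_two_pow]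
  by_cases h : i < w
  · simp [h]
  · have hiw : i = (i - w) + w := by omega
    have h1 : a.testBit i = (a / 2 ^ w).testBit (i - w) := by
      rw [Nat.testBit_div_two_pow]
      congr 1
    have h2 : b.testBit i = (b / 2 ^ w).testBit (i - w) := by
      rw [Nat.testBit_div_two_pow]
      congr 1
    simp [h, h1, h2, hq]

theorem cplLoop_binRep (w : Nat) : ∀ a b, a < 2 ^ w → b < 2 ^ w →
    cplLoop ((binRep w a).zip (binRep w b)) 0 =
      if a ^^^ b = 0 then (w : Int) else (w : Int) - (blN (a ^^^ b) : Int) := by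
  induction w with
  | zero =>
    intro a b ha hb
    have : a = 0 ∧ b = 0 := by simp at ha hb; omega
    obtain ⟨h1, h2⟩ := this
    subst h1; subst h2
    simp [binRep, cplLoop]
  | succ w ih =>
    intro a b ha hb
    have hqa : a / 2 ^ w < 2 := Nat.div_lt_of_lt_mul (by
      calc a < 2 ^ (w + 1) := ha
      _ = 2 ^ w * 2 := by ring)
    have hqb : b / 2 ^ w < 2 := Nat.div_lt_of_lt_mul (by
      calc b < 2 ^ (w + 1) := hb
      _ = 2 ^ w * 2 := by ring)
    have hra : a % 2 ^ w < 2 ^ w := Nat.mod_lt _ (by positivity)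
    have hrb : b % 2 ^ w < 2 ^ w := Nat.mod_lt _ (by positivity)
    have hxlt : a ^^^ b < 2 ^ (w + 1) := Nat.xor_lt_two_pow ha hb
    have hcons : (binRep (w + 1) a).zip (binRep (w + 1) b) =
        (Nat.digitChar (a / 2 ^ w), Nat.digitChar (b / 2 ^ w)) ::
          (binRep w (a % 2 ^ w)).zip (binRep w (b % 2 ^ w)) := rfl
    rw [hcons]
    by_cases heq : a / 2 ^ w = b / 2 ^ w
    · have hchar : Nat.digitChar (a / 2 ^ w) = Nat.digitChar (b / 2 ^ w) := by rw [heq]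
      simp only [cplLoop, hchar, if_pos, zero_add]
      rw [cplLoop_acc _ 1, ih _ _ hra hrb]
      have hxor : a ^^^ b = (a % 2 ^ w) ^^^ (b % 2 ^ w) := xor_high_eq ha hb heq
      rw [← hxor]
      by_cases hz : a ^^^ b = 0
      · simp [hz]
        ring
      · simp [hz]
        ring
    · have hchar : Nat.digitChar (a / 2 ^ w) ≠ Nat.digitChar (b / 2 ^ w) := by
        interval_cases h1 : a / 2 ^ w <;> interval_cases h2 : b / 2 ^ w <;> simp_all <;> decide
      simp only [cplLoop, hchar, ite_false]
      have hta : a.testBit w = decide (a / 2 ^ w = 1) := by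
        rw [Nat.testBit_eq_decide_div_mod_eq, Nat.mod_eq_of_lt hqa]
      have htb : b.testBit w = decide (b / 2 ^ w = 1) := by
        rw [Nat.testBit_eq_decide_div_mod_eq, Nat.mod_eq_of_lt hqb]
      have htx : (a ^^^ b).testBit w = true := by
        rw [Nat.testBit_xor, hta, htb]
        revert hqa hqb heq
        generalize a / 2 ^ w = qa
        generalize b / 2 ^ w = qb
        intro hqa hqb heq
        interval_cases qa <;> interval_cases qb <;> simp_all
      have hge : 2 ^ w ≤ a ^^^ b := Nat.ge_two_pow_of_testBit htx
      have hbl : blN (a ^^^ b) = w + 1 := blN_eq_of_bounds hge hxlt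
      have hne' : ¬ (a ^^^ b = 0) := by
        intro h
        rw [h] at hge
        have : (0:Nat) < 2 ^ w := by positivity
        omega
      rw [if_neg hne', hbl]
      push_cast
      ring

theorem bin_eq_binRep (a : Nat) :
    PySem.Chars.zfill (PySem.List.slice (PySem.Int.toBinChars0b (a : Int)) (some 2) none) 160 =
      binRep (max 160 (blN a)) a := by
  have h1 : PySem.Int.toBinChars0b (a : Int) = '0' :: 'b' :: Nat.toDigits 2 a := by
    simp [PySem.Int.toBinChars0b, Int.not_lt.mpr (Int.natCast_nonneg a)]
  rw [h1]
  have h2 : PySem.List.slice ('0' :: 'b' :: Nat.toDigits 2 a) (some 2) none = Nat.toDigits 2 a := by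
    have := PySem.List.slice_from_natCast ('0' :: 'b' :: Nat.toDigits 2 a) 2
    simpa using this
  rw [h2, toDigits_two, zfill_rep]
  apply padded_eq_binRep
  · omega
  · calc a < 2 ^ blN a := lt_two_pow_blN a
    _ ≤ 2 ^ max 160 (blN a) := Nat.pow_le_pow_right (by omega) (by omega)

-- ===== VERDICT (by name: the statement is the Claim_ definition above) =====
theorem common_prefix_length_spec : Claim_equal_common_prefix_length := by
  intro hash1 hash2 _ hpre
  unfold Spec_common_prefix_length
  obtain ⟨⟨hp1, hs1⟩, hp2, hs2⟩ := hpre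
  rcases e1 : PySem.Int.ofStrBase? hash1 16 with _ | n1
  · rw [e1] at hp1; norm_num at hp1
  rcases e2 : PySem.Int.ofStrBase? hash2 16 with _ | n2
  · rw [e2] at hp2; norm_num at hp2
  rw [e1] at hp1 hs1
  rw [e2] at hp2 hs2
  simp only [Option.getD_some] at hp1 hs1 hp2 hs2
  obtain ⟨a, rfl⟩ := Int.eq_ofNat_of_zero_le hp1
  obtain ⟨b, rfl⟩ := Int.eq_ofNat_of_zero_le hp2
  have ha : a < 2 ^ 160 := by exact_mod_cast hs1
  have hb : b < 2 ^ 160 := by exact_mod_cast hs2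
  have hm1 : max 160 (blN a) = 160 := by have := blN_le_of_lt_two_pow ha; omega
  have hm2 : max 160 (blN b) = 160 := by have := blN_le_of_lt_two_pow hb; omega
  simp only [common_prefix_length, common_prefix_length_alt, e1, e2]
  rw [bin_eq_binRep a, bin_eq_binRep b, hm1, hm2, cplLoop_binRep 160 a b ha hb]
  rw [PySem.Int.bxor_natCast]
  by_cases hz : a ^^^ b = 0
  · simp [hz]
  · rw [if_neg hz, if_neg (by exact_mod_cast hz)]
    norm_num [blN]
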